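-- pv_equiv track=rewrite | github.com/daniaandreea/Lab-3 | main.py | get_longest_sublist_all_palindrome
-- ===== SOURCE A (Python) =====
-- def is_palindrome(num):
--     """
--     Verifică dacă un număr dat este palindrom
--     :param num: int, numărul de verificat
--     :return: True, dacă numărul e palindrom
--              False, altfel
--     """
--     if num > 9:
--         copie = num
--         oglindit = 0
--         while copie > 0:
--             cifra = int(copie % 10)
--             oglindit = oglindit * 10 + cifra
--             copie = copie // 10
--         if num == oglindit:
--             return True
--         else:
--             return False
--     else:
--         return False
--
-- def all_palindrome(lst):
--     """
--     Determină dacă o listă este formată doar din palindroame.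
--     :param lst: lista dată
--     :return: True, dacă lst are doar palindroame
--             False, altfel
--     """
--     for num in lst:
--         if is_palindrome(num) is False:
--             return False
--     return True
--
-- def get_longest_sublist_all_palindrome(lst):
--     """
--     Determină cea mai lungă susecvență cu palindroame.
--     :param lst: lista dată
--     :return: o listă reprezentând subsecvența cerută
--     """
--     result = []
--     for i in range(len(lst)):
--         for j in range(i, len(lst)):
--             considered = lst[i:j + 1]
--             if all_palindrome(considered):
--                 if len(result) < len(considered):
--                     result = considered
--     return result
-- ===== SOURCE B (Python) =====
-- def is_palindrome(num):
--     if num > 9: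
--         copie = num
--         oglindit = 0
--         while copie > 0:
--             cifra = int(copie % 10)
--             oglindit = oglindit * 10 + cifra
--             copie = copie // 10
--         if num == oglindit:
--             return True
--         else:
--             return False
--     else:
--         return False
--
-- def get_longest_sublist_all_palindrome(lst):
--     """Single pass over runs of consecutive palindromes; keeps the first longest run."""
--     best = []
--     cur = []
--     for x in lst:
--         if is_palindrome(x):
--             cur = cur + [x]
--             if len(cur) > len(best):
--                 best = cur
--         else:
--             cur = []
--     return best
-- ===== Notes on version B (the rewrite author's own statement) =====
-- stated objective: faster
-- what changed: Replaced the cubic scan over all (i,j) slices (re-checking all_palindrome on each) by a single left-to-right pass that tracks the current run of consecutive palindromes and keeps the first longest run.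
import Mathlib
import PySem

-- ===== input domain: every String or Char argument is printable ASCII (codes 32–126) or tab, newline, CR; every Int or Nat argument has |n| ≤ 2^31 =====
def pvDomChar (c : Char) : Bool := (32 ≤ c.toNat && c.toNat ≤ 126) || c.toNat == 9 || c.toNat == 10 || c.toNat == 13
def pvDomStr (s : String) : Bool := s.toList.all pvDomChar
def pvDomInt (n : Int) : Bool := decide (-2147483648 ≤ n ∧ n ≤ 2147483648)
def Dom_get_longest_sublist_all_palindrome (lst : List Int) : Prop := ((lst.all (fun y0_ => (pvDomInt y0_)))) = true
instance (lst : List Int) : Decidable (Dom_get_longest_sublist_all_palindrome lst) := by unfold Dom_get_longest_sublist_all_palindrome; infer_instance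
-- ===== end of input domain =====

-- B replaces A's cubic scan over all (i,j) slices by one left-to-right pass over runs of
-- consecutive palindromes, keeping the first longest run (objective: faster, asymptotic).

-- ===== PORT A =====
-- the while-loop of is_palindrome: reverses the decimal digits of copie onto oglindit
def pvRevLoop (copie oglindit : Int) : Int :=
  if h : copie > 0 then
    pvRevLoop (PySem.Int.floordiv copie 10) (oglindit * 10 + PySem.Int.mod copie 10)
  else oglindit
termination_by copie.toNat
decreasing_by
  rw [PySem.Int.floordiv_eq_ediv_of_pos (by norm_num)]
  have h2 : copie / 10 < copie := Int.ediv_lt_of_lt_mul (by norm_num) (by omega)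
  have h3 : 0 ≤ copie / 10 := Int.ediv_nonneg (by omega) (by norm_num)
  omega

def is_palindrome (num : Int) : Bool :=
  if num > 9 then
    let oglindit := pvRevLoop num 0
    if num = oglindit then true else false
  else false

def all_palindrome : List Int → Bool
  | [] => true
  | num :: rest => if is_palindrome num = false then false else all_palindrome rest

def get_longest_sublist_all_palindrome (lst : List Int) : List Int :=
  (PySem.List.pyRange 0 (lst.length : Int) 1).foldl (fun result i =>
    (PySem.List.pyRange i (lst.length : Int) 1).foldl (fun result j =>
      let considered := PySem.List.slice lst (some i) (some (j + 1))
      if all_palindrome considered then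
        if result.length < considered.length then considered else result
      else result) result) []

-- ===== PORT B =====
def get_longest_sublist_all_palindrome_alt (lst : List Int) : List Int :=
  (lst.foldl (fun (st : List Int × List Int) x =>
    if is_palindrome x then
      let cur' := st.2 ++ [x]
      (if cur'.length > st.1.length then cur' else st.1, cur')
    else (st.1, ([] : List Int))) (([] : List Int), ([] : List Int))).1

-- ===== PRECONDITION & SPEC =====
def Spec_get_longest_sublist_all_palindrome (lst : List Int) (out : List Int) : Prop := out = get_longest_sublist_all_palindrome_alt lst
instance (lst : List Int) (out : List Int) : Decidable (Spec_get_longest_sublist_all_palindrome lst out) := by unfold Spec_get_longest_sublist_all_palindrome; infer_instance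

-- ===== CLAIM (what is proved, stated in full; the proofs are below) =====
def Claim_equal_get_longest_sublist_all_palindrome : Prop := ∀ (lst : List Int), Dom_get_longest_sublist_all_palindrome lst → Spec_get_longest_sublist_all_palindrome lst (get_longest_sublist_all_palindrome lst)

-- ===== LEMMAS AND PROOFS =====

-- all_palindrome is List.all is_palindrome
theorem all_palindrome_eq_all (l : List Int) : all_palindrome l = l.all is_palindrome := by
  induction l with
  | nil => rfl
  | cons x xs ih =>
    simp only [all_palindrome, List.all_cons, ih]
    cases h : is_palindrome x <;> simp [h]

-- helper: takeWhile of an all-true list is itself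
theorem takeWhile_all_of_all {α : Type} {p : α → Bool} {l : List α}
    (h : l.all p = true) : l.takeWhile p = l := by
  induction l with
  | nil => rfl
  | cons x xs ih =>
    simp only [List.all_cons, Bool.and_eq_true] at h
    rw [List.takeWhile_cons_of_pos h.1, ih h.2]

-- helper: takeWhile length is at most the list length
theorem pvLenTakeWhileLe (p : Int → Bool) (l : List Int) : (l.takeWhile p).length ≤ l.length :=
  (List.takeWhile_prefix p).length_le

-- helper: takeWhile after dropWhile is empty
theorem pvTakeWhileDropWhile (p : Int → Bool) (l : List Int) : (l.dropWhile p).takeWhile p = [] := by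
  cases h : l.dropWhile p with
  | nil => rfl
  | cons z rs =>
    have hz : p z = false := by
      have := List.head_dropWhile_not p (l := l) (by simp [h])
      simpa [h] using this
    simp [hz]

-- the one-run-at-a-time step both sides reduce to
def pvStep (l best : List Int) : List Int :=
  let t := l.takeWhile is_palindrome
  if best.length < t.length then t else best

-- A reformulated as a fold over suffixes
def pvGoA : List Int → List Int → List Int
  | [], best => best
  | x :: xs, best => pvGoA xs (pvStep (x :: xs) best)

-- B reformulated as structural recursion with (best, cur)
def pvGoB : List Int → List Int → List Int → List Int
  | [], best, _ => best
  | x :: xs, best, cur =>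
    if is_palindrome x then
      pvGoB xs (if (cur ++ [x]).length > best.length then cur ++ [x] else best) (cur ++ [x])
    else pvGoB xs best []

-- B's foldl is pvGoB
theorem altB_eq_goB (l : List Int) (best cur : List Int) :
    (l.foldl (fun (st : List Int × List Int) x =>
      if is_palindrome x then
        let cur' := st.2 ++ [x]
        (if cur'.length > st.1.length then cur' else st.1, cur')
      else (st.1, ([] : List Int))) (best, cur)).1 = pvGoB l best cur := by
  induction l generalizing best cur with
  | nil => rfl
  | cons x xs ih =>
    by_cases h : is_palindrome x = true
    · simpa [pvGoB, h, List.foldl_cons] using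
        ih (if (cur ++ [x]).length > best.length then cur ++ [x] else best) (cur ++ [x])
    · simpa [pvGoB, h, List.foldl_cons] using ih best []

-- prefix of length m is all-palindromes iff m ≤ takeWhile length (m ≤ l.length)
theorem take_all_iff (l : List Int) (m : Nat) (hm : m ≤ l.length) :
    ((l.take m).all is_palindrome = true) ↔ m ≤ (l.takeWhile is_palindrome).length := by
  induction l generalizing m with
  | nil =>
    simp at hm
    simp [hm]
  | cons x xs ih =>
    cases m with
    | zero => simp
    | succ m' =>
      simp only [List.take_succ_cons, List.all_cons, List.takeWhile_cons, Bool.and_eq_true]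
      cases h : is_palindrome x with
      | false => simp [h]
      | true =>
        simp only [h, if_true, true_and, List.length_cons]
        rw [ih m' (by simpa using hm)]
        omega

-- the all-palindrome prefix is a prefix of takeWhile
theorem take_eq_takeWhile_take (l : List Int) (m : Nat)
    (hm : m ≤ (l.takeWhile is_palindrome).length) :
    l.take m = (l.takeWhile is_palindrome).take m := by
  induction l generalizing m with
  | nil => simp
  | cons x xs ih =>
    cases m with
    | zero => simp
    | succ m' =>
      cases h : is_palindrome x with
      | false => simp [List.takeWhile_cons, h] at hm
      | true =>
        simp only [List.take_succ_cons, List.takeWhile_cons, h, if_true]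
        rw [ih m' (by simp [List.takeWhile_cons, h] at hm; omega)]

-- partial inner fold of A, characterised
theorem inner_partial (l : List Int) (m : Nat) (hm : m ≤ l.length) (best : List Int) :
    (List.range m).foldl (fun b k =>
      let c := l.take (k + 1)
      if all_palindrome c then (if b.length < c.length then c else b) else b) best
    = (if best.length < min m (l.takeWhile is_palindrome).length
        then (l.takeWhile is_palindrome).take m else best) := by
  induction m with
  | zero => simp
  | succ m' ih =>
    rw [List.range_succ, List.foldl_append, ih (by omega)]
    simp only [List.foldl_cons, List.foldl_nil]
    set t := l.takeWhile is_palindrome with ht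
    have htl : t.length ≤ l.length := by rw [ht]; exact pvLenTakeWhileLe _ _
    rw [all_palindrome_eq_all]
    by_cases hpal : m' + 1 ≤ t.length
    · have hall : (l.take (m' + 1)).all is_palindrome = true := by
        rw [take_all_iff l (m' + 1) (by omega), ← ht]; exact hpal
      rw [hall, if_pos rfl]
      have hc : l.take (m' + 1) = t.take (m' + 1) := by
        have := take_eq_takeWhile_take l (m' + 1) (by rw [← ht] at *; exact hpal)
        rw [← ht] at this; exact this
      rw [hc]
      have hlen1 : (t.take (m' + 1)).length = m' + 1 := by simp; omega
      have hlen2 : (t.take m').length = m' := by simp; omega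
      by_cases hb : best.length < min m' t.length
      · rw [if_pos hb, if_pos (by rw [hlen1, hlen2]; omega), if_pos (by omega)]
      · rw [if_neg hb]
        by_cases hb2 : best.length < m' + 1
        · rw [if_pos (by rw [hlen1]; omega), if_pos (by omega)]
        · rw [if_neg (by rw [hlen1]; omega), if_neg (by omega)]
    · have hall : (l.take (m' + 1)).all is_palindrome = false := by
        cases hq : (l.take (m' + 1)).all is_palindrome
        · rfl
        · have h2 := (take_all_iff l (m' + 1) hm).mp hq
          rw [← ht] at h2
          omega
      rw [hall]
      simp only [Bool.false_eq_true, if_false]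
      have hmin : min (m' + 1) t.length = min m' t.length := by omega
      rw [hmin]
      by_cases hb : best.length < min m' t.length
      · rw [if_pos hb, if_pos hb]
        rw [List.take_of_length_le (by omega), List.take_of_length_le (by omega)]
      · rw [if_neg hb, if_neg hb]

-- full inner fold of A is pvStep
theorem inner_eq_step (l : List Int) (best : List Int) :
    (List.range l.length).foldl (fun b k =>
      let c := l.take (k + 1)
      if all_palindrome c then (if b.length < c.length then c else b) else b) best
    = pvStep l best := by
  rw [inner_partial l l.length (le_refl _) best]
  have htl : (l.takeWhile is_palindrome).length ≤ l.length := pvLenTakeWhileLe _ _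
  unfold pvStep
  rw [min_eq_right htl, List.take_of_length_le htl]

-- outer Nat-fold of pvStep over suffixes is pvGoA
theorem outer_eq_goA (l : List Int) (best : List Int) :
    (List.range l.length).foldl (fun b k => pvStep (l.drop k) b) best = pvGoA l best := by
  induction l generalizing best with
  | nil => rfl
  | cons x xs ih =>
    rw [List.length_cons, List.range_succ_eq_map, List.foldl_cons, List.foldl_map]
    simpa [pvGoA] using ih (pvStep (x :: xs) best)

-- A's port equals the Nat-indexed fold of inner folds
theorem portA_eq_natfold (lst : List Int) :
    get_longest_sublist_all_palindrome lst
    = (List.range lst.length).foldl (fun best k =>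
        (List.range (lst.length - k)).foldl (fun b m =>
          let c := (lst.drop k).take (m + 1)
          if all_palindrome c then (if b.length < c.length then c else b) else b) best) [] := by
  unfold get_longest_sublist_all_palindrome
  rw [PySem.List.pyRange_one 0 (lst.length : Int)]
  have h0 : ((lst.length : Int) - 0).toNat = lst.length := by omega
  rw [h0, List.foldl_map]
  apply PySem.List.foldl_congr_mem'
  intro k hk b
  rw [List.mem_range] at hk
  rw [PySem.List.pyRange_one (0 + (k : Int)) (lst.length : Int)]
  have h1 : ((lst.length : Int) - (0 + (k : Int))).toNat = lst.length - k := by omega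
  rw [h1, List.foldl_map]
  apply PySem.List.foldl_congr_mem'
  intro m hm b'
  have hs : PySem.List.slice lst (some (0 + (k : Int))) (some (0 + (k : Int) + (m : Int) + 1))
      = (lst.drop k).take (m + 1) := by
    have e1 : (0 + (k : Int) + (m : Int) + 1) = ((k : Nat) : Int) + ((m + 1 : Nat) : Int) := by
      push_cast; ring
    have e2 : (0 + (k : Int)) = ((k : Nat) : Int) := by push_cast; ring
    rw [e1, e2, PySem.List.slice_natCast_add]
  simp only [hs]

-- run-consumption lemma for B: consuming a full run updates best once
theorem goB_run (run rest best cur : List Int)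
    (hrun : run.all is_palindrome = true)
    (hrest : rest.takeWhile is_palindrome = [])
    (hbc : cur.length ≤ best.length) :
    pvGoB (run ++ rest) best cur
    = pvGoB rest (if best.length < (cur ++ run).length then cur ++ run else best) [] := by
  induction run generalizing best cur with
  | nil =>
    rw [if_neg (by simp; omega)]
    cases rest with
    | nil => rfl
    | cons z rs =>
      have hz : is_palindrome z = false := by
        cases h : is_palindrome z
        · rfl
        · simp [List.takeWhile_cons, h] at hrest
      simp [pvGoB, hz]
  | cons y run' ih =>
    simp only [List.all_cons, Bool.and_eq_true] at hrun
    simp only [List.cons_append, pvGoB, hrun.1, if_pos]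
    rw [ih _ _ hrun.2 (by
      by_cases hgt : (cur ++ [y]).length > best.length
      · rw [if_pos hgt]
      · rw [if_neg hgt]; simp at hgt ⊢; omega)]
    congr 1
    have hcr : cur ++ [y] ++ run' = cur ++ y :: run' := by simp
    rw [hcr]
    by_cases h1 : (cur ++ [y]).length > best.length
    · rw [if_pos h1]
      have hl1 : (cur ++ [y]).length = cur.length + 1 := by simp
      have hl2 : (cur ++ y :: run').length = cur.length + 1 + run'.length := by simp; omega
      have h1' : best.length < cur.length + 1 := by simpa using h1
      rw [if_pos (show best.length < (cur ++ y :: run').length by simp only [hl2]; omega)]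
      by_cases hr : run' = []
      · subst hr
        rw [if_neg (by simp)]
      · have hrl : 0 < run'.length := List.length_pos_of_ne_nil hr
        rw [if_pos (by simp only [hl1, hl2]; omega)]
    · rw [if_neg h1]

-- pvGoA also consumes a run in one step (when best is already at least as long)
theorem goA_skip (run rest best : List Int)
    (hrun : run.all is_palindrome = true)
    (hrest : rest.takeWhile is_palindrome = [])
    (hb : run.length ≤ best.length) :
    pvGoA (run ++ rest) best = pvGoA rest best := by
  induction run generalizing best with
  | nil => simp
  | cons y run' ih =>
    simp only [List.all_cons, Bool.and_eq_true] at hrun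
    simp only [List.cons_append, pvGoA]
    have htw : (y :: (run' ++ rest)).takeWhile is_palindrome = y :: run' := by
      rw [List.takeWhile_cons_of_pos hrun.1, List.takeWhile_append]
      simp [takeWhile_all_of_all hrun.2, hrest]
    have hstep : pvStep (y :: (run' ++ rest)) best = best := by
      unfold pvStep
      rw [htw, if_neg (by simp at hb ⊢; omega)]
    rw [hstep]
    have hb' : run'.length ≤ best.length := by simp only [List.length_cons] at hb; omega
    exact ih _ hrun.2 hb'

-- main equivalence of the two reformulations
theorem goA_eq_goB (l : List Int) (best : List Int) :
    pvGoA l best = pvGoB l best [] := by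
  generalize hn : l.length = n
  induction n using Nat.strong_induction_on generalizing l best with
  | _ n ih =>
    cases l with
    | nil => rfl
    | cons x xs =>
      by_cases hx : is_palindrome x = true
      · -- leading run
        set run := (x :: xs).takeWhile is_palindrome with hrundef
        set rest := (x :: xs).dropWhile is_palindrome with hrestdef
        have hsplit : run ++ rest = x :: xs := List.takeWhile_append_dropWhile
        have hrun : run.all is_palindrome = true := by
          rw [hrundef]; exact List.all_takeWhile
        have hrest : rest.takeWhile is_palindrome = [] := by
          rw [hrestdef]; exact pvTakeWhileDropWhile _ _
        have hrunne : run ≠ [] := by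
          rw [hrundef]; simp [List.takeWhile_cons_of_pos hx]
        have hn' : xs.length + 1 = n := by simpa using hn
        have hlen : rest.length < n := by
          have hls := congrArg List.length hsplit
          simp only [List.length_append, List.length_cons] at hls
          have hr : 0 < run.length := List.length_pos_of_ne_nil hrunne
          omega
        -- A side: the run is consumed with a single best update
        have hA : pvGoA (x :: xs) best = pvGoA rest (if best.length < run.length then run else best) := by
          conv_lhs => rw [← hsplit]
          cases hre : run with
          | nil => exact absurd hre hrunne
          | cons y run' =>
            have hall : is_palindrome y = true ∧ run'.all is_palindrome = true := by
              have := hrun; rw [hre] at this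
              simpa using this
            simp only [List.cons_append, pvGoA]
            have htw : (y :: (run' ++ rest)).takeWhile is_palindrome = y :: run' := by
              rw [List.takeWhile_cons_of_pos hall.1, List.takeWhile_append]
              simp [takeWhile_all_of_all hall.2, hrest]
            have hstep : pvStep (y :: (run' ++ rest)) best
                = (if best.length < (y :: run').length then y :: run' else best) := by
              unfold pvStep; rw [htw]
            rw [hstep]
            apply goA_skip run' rest _ hall.2 hrest
            by_cases hbl : best.length < (y :: run').length
            · rw [if_pos hbl]; simp
            · rw [if_neg hbl]; simp at hbl ⊢; omega
        -- B side: the run is consumed with gradually growing cur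
        have hB : pvGoB (x :: xs) best [] = pvGoB rest (if best.length < run.length then run else best) [] := by
          conv_lhs => rw [← hsplit]
          simpa using goB_run run rest best [] hrun hrest (by simp)
        rw [hA, hB]
        exact ih rest.length hlen rest _ rfl
      · -- non-palindrome head: both sides just move on
        have hx' : is_palindrome x = false := by
          cases h : is_palindrome x
          · rfl
          · exact absurd h hx
        have hA : pvGoA (x :: xs) best = pvGoA xs best := by
          simp only [pvGoA]
          have hstep : pvStep (x :: xs) best = best := by
            unfold pvStep
            rw [List.takeWhile_cons_of_neg (by simp [hx'])]
            simp
          rw [hstep]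
        have hB : pvGoB (x :: xs) best [] = pvGoB xs best [] := by
          simp [pvGoB, hx']
        rw [hA, hB]
        have hn' : xs.length + 1 = n := by simpa using hn
        exact ih xs.length (by omega) xs best rfl

-- ===== VERDICT (by name: the statement is the Claim_ definition above) =====
theorem get_longest_sublist_all_palindrome_spec : Claim_equal_get_longest_sublist_all_palindrome := by
  intro lst _
  unfold Spec_get_longest_sublist_all_palindrome
  rw [portA_eq_natfold]
  unfold get_longest_sublist_all_palindrome_alt
  rw [altB_eq_goB, ← goA_eq_goB, ← outer_eq_goA]
  apply PySem.List.foldl_congr_mem'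
  intro k hk b
  rw [List.mem_range] at hk
  have hdl : (lst.drop k).length = lst.length - k := by simp
  rw [← hdl, inner_eq_step]
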